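-- pv_equiv track=rewrite | github.com/netr/qrcodey | qr.py | _evaluate_3
-- ===== SOURCE A (Python) =====
-- from typing import Tuple, List
--
-- def _evaluate_3(matrix: List[List[int]]) -> int:
--     points = 0
--     pattern_1 = (2, 2, 2, 2, 0, 2, 0, 0, 0, 2, 0)
--     pattern_2 = (0, 2, 0, 0, 0, 2, 0, 2, 2, 2, 2)
--
--     for r in range(len(matrix)):
--         for c in range(len(matrix[r])):
--             if (
--                 tuple(matrix[r][c : c + 11]) == pattern_1
--                 or tuple(matrix[r][c : c + 11]) == pattern_2
--             ):
--                 points += 40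
--
--     matrix = list(zip(*matrix))
--     for r in range(len(matrix)):
--         for c in range(len(matrix[r])):
--             if (
--                 matrix[r][c : c + 11] == pattern_1
--                 or matrix[r][c : c + 11] == pattern_2
--             ):
--                 points += 40
--
--     return points
-- ===== SOURCE B (Python) =====
-- from typing import List
--
--
-- def _rle(line) -> List[tuple]:
--     """Run-length encode a line: [(value, run_length), ...]."""
--     if not line:
--         return []
--     x = line[0]
--     k = 1
--     while k < len(line) and line[k] == x:
--         k += 1
--     return [(x, k)] + _rle(line[k:])
--
--
-- def _count_runs(runs) -> int:
--     """Score pattern occurrences from the run-length encoding.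
--
--     Pattern 1 (2,2,2,2,0,2,0,0,0,2,0) occurs once per run window
--     (2,>=4),(0,1),(2,1),(0,3),(2,1),(0,*); pattern 2 is its mirror."""
--     if len(runs) < 6:
--         return 0
--     a, b, c, d, e, f = runs[:6]
--     hit = 0
--     if a[0] == 2 and a[1] >= 4 and (b, c, d, e) == ((0, 1), (2, 1), (0, 3), (2, 1)) and f[0] == 0:
--         hit += 40
--     if a[0] == 0 and (b, c, d, e) == ((2, 1), (0, 3), (2, 1), (0, 1)) and f[0] == 2 and f[1] >= 4:
--         hit += 40
--     return hit + _count_runs(runs[1:])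
--
--
-- def _evaluate_3(matrix: List[List[int]]) -> int:
--     total = 0
--     for line in list(matrix) + list(zip(*matrix)):
--         total += _count_runs(_rle(line))
--     return total
-- ===== Notes on version B (the rewrite author's own statement) =====
-- stated objective: alternative
-- what changed: B run-length-encodes each row/column once and counts pattern hits by scanning 6-run windows of the RLE ((2,>=4),(0,1),(2,1),(0,3),(2,1),(0,*) for pattern 1 and its mirror for pattern 2), instead of A's slicing and comparing an 11-cell window at every start index.
import Mathlib
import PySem

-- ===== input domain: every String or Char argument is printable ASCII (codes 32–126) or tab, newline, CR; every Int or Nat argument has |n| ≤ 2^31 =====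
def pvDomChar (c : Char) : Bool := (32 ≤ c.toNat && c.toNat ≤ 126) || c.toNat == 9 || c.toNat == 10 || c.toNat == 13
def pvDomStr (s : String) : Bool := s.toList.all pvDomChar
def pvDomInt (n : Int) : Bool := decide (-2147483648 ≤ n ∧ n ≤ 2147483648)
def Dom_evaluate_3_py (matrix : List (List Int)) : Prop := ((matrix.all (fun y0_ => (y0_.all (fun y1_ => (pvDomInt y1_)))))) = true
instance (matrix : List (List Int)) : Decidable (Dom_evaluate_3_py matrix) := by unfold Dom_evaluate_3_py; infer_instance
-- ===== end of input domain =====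

-- B replaces A's slice-and-compare of an 11-cell window at every start index by run-length
-- encoding each row/column once and counting pattern hits from 6-run windows of the encoding
-- (a different algorithm of similar cost).

-- QR penalty patterns (shared literal data of both programs)
def pvP1 : List Int := [2, 2, 2, 2, 0, 2, 0, 0, 0, 2, 0]
def pvP2 : List Int := [0, 2, 0, 0, 0, 2, 0, 2, 2, 2, 2]

-- port of Python's zip(*lists) (both A and B call zip):
-- stops as soon as some argument list is empty; zip() with no arguments is empty.
def pvZipStar (ls : List (List Int)) : List (List Int) :=
  if h : ls = [] ∨ [] ∈ ls then []
  else (ls.map (fun l => l.headI)) :: pvZipStar (ls.map List.tail)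
termination_by ls.headI.length
decreasing_by
  match ls, h with
  | x :: rest, h =>
    have hx : x ≠ [] := by
      intro hx
      exact h (Or.inr (by rw [← hx]; exact List.mem_cons_self))
    have hlen : x.length ≠ 0 := fun h0 => hx (List.eq_nil_of_length_eq_zero h0)
    have := List.length_tail (l := x)
    simp
    omega

-- ===== PORT A =====
def evaluate_3_py (matrix : List (List Int)) : Int :=
  -- first double loop: per row, per start index c, compare tuple(matrix[r][c:c+11]) to the patterns
  let points : Int := matrix.foldl (fun pts row =>
      (PySem.List.pyRange 0 row.length 1).foldl (fun p c =>
        if PySem.List.slice row (some c) (some (c + 11)) = pvP1 ∨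
           PySem.List.slice row (some c) (some (c + 11)) = pvP2
        then p + 40 else p) pts) 0
  -- matrix = list(zip(*matrix)); then the same double loop over the transposed matrix
  let m2 := pvZipStar matrix
  m2.foldl (fun pts row =>
      (PySem.List.pyRange 0 row.length 1).foldl (fun p c =>
        if PySem.List.slice row (some c) (some (c + 11)) = pvP1 ∨
           PySem.List.slice row (some c) (some (c + 11)) = pvP2
        then p + 40 else p) pts) points

-- ===== PORT B =====
-- _rle(line): run-length encoding [(value, run length), ...]; the while loop counting the
-- first run is the length of the equal prefix of line[1:] (takeWhile), and line[k:] is the rest.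
def pyRle : List Int → List (Int × Int)
  | [] => []
  | x :: xs =>
      (x, 1 + ((xs.takeWhile (fun y => y == x)).length : Int)) ::
        pyRle (xs.dropWhile (fun y => y == x))
termination_by l => l.length
decreasing_by
  have := List.length_dropWhile_le (fun y => y == x) xs
  simp
  omega

-- _count_runs(runs): recursion over suffixes, checking the leading 6 runs
def pyCountRuns : List (Int × Int) → Int
  | a :: b :: c :: d :: e :: f :: rest =>
      ((if a.1 = 2 ∧ 4 ≤ a.2 ∧ (b, c, d, e) = ((0, 1), (2, 1), (0, 3), (2, 1)) ∧ f.1 = 0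
        then 40 else 0) +
       (if a.1 = 0 ∧ (b, c, d, e) = ((2, 1), (0, 3), (2, 1), (0, 1)) ∧ f.1 = 2 ∧ 4 ≤ f.2
        then 40 else 0)) +
      pyCountRuns (b :: c :: d :: e :: f :: rest)
  | _ => 0
termination_by l => l.length
decreasing_by simp

def evaluate_3_py_alt (matrix : List (List Int)) : Int :=
  (matrix ++ pvZipStar matrix).foldl (fun tot line => tot + pyCountRuns (pyRle line)) 0

-- ===== PRECONDITION & SPEC =====
def Spec_evaluate_3_py (matrix : List (List Int)) (out : Int) : Prop := out = evaluate_3_py_alt matrix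
instance (matrix : List (List Int)) (out : Int) : Decidable (Spec_evaluate_3_py matrix out) := by unfold Spec_evaluate_3_py; infer_instance

-- ===== CLAIM (what is proved, stated in full; the proofs are below) =====
def Claim_equal_evaluate_3_py : Prop := ∀ (matrix : List (List Int)), Dom_evaluate_3_py matrix → Spec_evaluate_3_py matrix (evaluate_3_py matrix)

-- ===== LEMMAS AND PROOFS =====

-- the tails of the two patterns after their leading run
def pvPat1Tail : List Int := [0, 2, 0, 0, 0, 2, 0]
def pvPat2Tail : List Int := [2, 0, 0, 0, 2, 0, 2, 2, 2, 2]

-- number of pattern start positions, counted along the tails of a line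
def pvTCount : List Int → Int
  | [] => 0
  | x :: xs =>
    (if (x :: xs).take 11 = pvP1 ∨ (x :: xs).take 11 = pvP2 then 1 else 0) + pvTCount xs

-- A's inner loop, started at index k, counts pattern starts in the k-th tail
lemma pvLineA_aux (row : List Int) :
    ∀ (fuel k : Nat) (pts : Int), row.length - k ≤ fuel →
    (PySem.List.pyRange (k : Int) (row.length : Int) 1).foldl (fun p c =>
        if PySem.List.slice row (some c) (some (c + 11)) = pvP1 ∨
           PySem.List.slice row (some c) (some (c + 11)) = pvP2
        then p + 40 else p) pts = pts + 40 * pvTCount (row.drop k) := by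
  intro fuel
  induction fuel with
  | zero =>
    intro k pts h
    have hk : row.length ≤ k := by omega
    rw [PySem.List.pyRange_one_eq_nil (by exact_mod_cast hk)]
    simp [List.drop_eq_nil_of_le hk, pvTCount]
  | succ n ih =>
    intro k pts h
    by_cases hk : k < row.length
    · rw [PySem.List.pyRange_one_cons (by exact_mod_cast hk)]
      simp only [List.foldl_cons]
      have hslice : PySem.List.slice row (some (k:Int)) (some ((k:Int) + 11)) = (row.drop k).take 11 := by
        have h2 := PySem.List.slice_natCast_add (xs := row) (j := k) (n := 11)
        simpa using h2
      have hcast : ((k:Int) + 1) = ((k+1 : Nat) : Int) := by push_cast; ring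
      rw [hslice, hcast, ih (k+1) _ (by omega)]
      have hdrop : row.drop k = row[k] :: row.drop (k+1) := List.drop_eq_getElem_cons hk
      rw [hdrop, pvTCount, ← hdrop]
      split_ifs with hcond
      · generalize pvTCount (row.drop (k+1)) = t
        ring
      · generalize pvTCount (row.drop (k+1)) = t
        ring
    · have hk' : row.length ≤ k := by omega
      rw [PySem.List.pyRange_one_eq_nil (by exact_mod_cast hk')]
      simp [List.drop_eq_nil_of_le hk', pvTCount]

lemma pvEqP2 (j : Nat) (x : Int) (M : List Int) (hj : 1 ≤ j) :
    ((List.replicate j x ++ M).take 11 = pvP2 ↔ (x = 0 ∧ j = 1 ∧ M.take 10 = pvPat2Tail)) := by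
  match j, hj with
  | 1, _ =>
    simp [pvP2, pvPat2Tail, List.replicate_succ]
  | (n+2), _ =>
    simp [pvP2, List.replicate_succ]
    intro h1 h2
    omega

lemma pvEqP1 (j : Nat) (x : Int) (M : List Int) (hj : 1 ≤ j) (hM : M.head? ≠ some x) :
    ((List.replicate j x ++ M).take 11 = pvP1 ↔ (x = 2 ∧ j = 4 ∧ M.take 7 = pvPat1Tail)) := by
  match j, hj with
  | 1, _ =>
    simp [pvP1, List.replicate_succ]
    rintro rfl h
    rcases M with _ | ⟨m, M⟩
    · simp at h
    · simp at h
      simp [h.1] at hM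
  | 2, _ =>
    simp [pvP1, List.replicate_succ]
    rintro rfl h
    rcases M with _ | ⟨m, M⟩
    · simp at h
    · simp at h
      simp [h.1] at hM
  | 3, _ =>
    simp [pvP1, List.replicate_succ]
    rintro rfl h
    rcases M with _ | ⟨m, M⟩
    · simp at h
    · simp at h
      simp [h.1] at hM
  | 4, _ =>
    simp [pvP1, pvPat1Tail, List.replicate_succ]
  | (n+5), _ =>
    simp [pvP1, List.replicate_succ]
    intro h1 h2
    omega

def pvHits (x : Int) (j : Nat) (M : List Int) : Int :=
  (if x = 2 ∧ 4 ≤ j ∧ M.take 7 = pvPat1Tail then 1 else 0) +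
  (if x = 0 ∧ 1 ≤ j ∧ M.take 10 = pvPat2Tail then 1 else 0)

lemma pvTCount_run (x : Int) (M : List Int) (hM : M.head? ≠ some x) :
    ∀ j : Nat, pvTCount (List.replicate j x ++ M) = pvHits x j M + pvTCount M := by
  intro j
  induction j with
  | zero => simp [pvHits]
  | succ n ih =>
    have hrep : List.replicate (n+1) x ++ M = x :: (List.replicate n x ++ M) := by
      simp [List.replicate_succ]
    rw [hrep, pvTCount, ← hrep, ih]
    have h1 := pvEqP1 (n+1) x M (by omega) hM
    have h2 := pvEqP2 (n+1) x M (by omega)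
    simp only [h1, h2]
    unfold pvHits
    by_cases hx2 : x = 2 <;> by_cases hx0 : x = 0 <;>
      by_cases h7 : M.take 7 = pvPat1Tail <;> by_cases h10 : M.take 10 = pvPat2Tail <;>
      simp [hx2, hx0, h7, h10] <;> split_ifs <;> omega

lemma pvTW_replicate (x : Int) (xs : List Int) :
    xs.takeWhile (fun y => y == x) = List.replicate (xs.takeWhile (fun y => y == x)).length x := by
  apply List.eq_replicate_of_mem
  intro b hb
  simpa using List.mem_takeWhile_imp hb

lemma pvDW_head (x : Int) (xs : List Int) :
    (xs.dropWhile (fun y => y == x)).head? ≠ some x := by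
  intro h
  have := List.head?_dropWhile_not (fun y => y == x) xs
  rw [h] at this
  simp at this

lemma pvRle_inv {M : List Int} {v k : Int} {rest : List (Int × Int)}
    (h : pyRle M = (v, k) :: rest) :
    ∃ M', M = List.replicate k.toNat v ++ M' ∧ 1 ≤ k ∧ pyRle M' = rest ∧ M'.head? ≠ some v := by
  cases M with
  | nil => simp [pyRle] at h
  | cons x xs =>
    rw [pyRle] at h
    obtain ⟨⟨rfl, rfl⟩, hrest⟩ : (x = v ∧ 1 + ((xs.takeWhile (fun y => y == x)).length : Int) = k) ∧
        pyRle (xs.dropWhile (fun y => y == x)) = rest := by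
      simpa using h
    refine ⟨xs.dropWhile (fun y => y == x), ?_, by omega, hrest, pvDW_head x xs⟩
    have ht : (1 + ((xs.takeWhile (fun y => y == x)).length : Int)).toNat
        = (xs.takeWhile (fun y => y == x)).length + 1 := by omega
    rw [ht, List.replicate_succ, List.cons_append]
    rw [← pvTW_replicate, List.takeWhile_append_dropWhile]

def pvHeadHit (a : Int × Int) (rs : List (Int × Int)) : Int :=
  match rs with
  | b :: c :: d :: e :: f :: _ =>
      (if a.1 = 2 ∧ 4 ≤ a.2 ∧ (b, c, d, e) = ((0, 1), (2, 1), (0, 3), (2, 1)) ∧ f.1 = 0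
       then 40 else 0) +
      (if a.1 = 0 ∧ (b, c, d, e) = ((2, 1), (0, 3), (2, 1), (0, 1)) ∧ f.1 = 2 ∧ 4 ≤ f.2
       then 40 else 0)
  | _ => 0

lemma pvTake7_shape (M : List Int) (h : M.take 7 = pvPat1Tail) :
    ∃ M', M = 0::2::0::0::0::2::0::M' := by
  rcases M with _|⟨a0,_|⟨a1,_|⟨a2,_|⟨a3,_|⟨a4,_|⟨a5,_|⟨a6,M'⟩⟩⟩⟩⟩⟩⟩ <;> simp [pvPat1Tail] at h
  obtain ⟨rfl,rfl,rfl,rfl,rfl,rfl,rfl⟩ := h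
  exact ⟨M', rfl⟩

lemma pvTake10_shape (M : List Int) (h : M.take 10 = pvPat2Tail) :
    ∃ M', M = 2::0::0::0::2::0::2::2::2::2::M' := by
  rcases M with _|⟨a0,_|⟨a1,_|⟨a2,_|⟨a3,_|⟨a4,_|⟨a5,_|⟨a6,_|⟨a7,_|⟨a8,_|⟨a9,M'⟩⟩⟩⟩⟩⟩⟩⟩⟩⟩ <;>
    simp [pvPat2Tail] at h
  obtain ⟨rfl,rfl,rfl,rfl,rfl,rfl,rfl,rfl,rfl,rfl⟩ := h
  exact ⟨M', rfl⟩

lemma pvHeadHit_eq (x k : Int) (j : Nat) (M : List Int) (hk : k = (j : Int)) (hj : 1 ≤ j) :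
    pvHeadHit (x, k) (pyRle M) = 40 * pvHits x j M := by
  subst hk
  by_cases h7 : M.take 7 = pvPat1Tail
  · obtain ⟨M', rfl⟩ := pvTake7_shape M h7
    have h10 : ¬((0::2::0::0::0::2::0::M').take 10 = pvPat2Tail) := by simp [pvPat2Tail]
    simp [pyRle, pvHeadHit, pvHits, h7]
    split_ifs <;> first | omega | simp_all [pvPat1Tail, pvPat2Tail]
  · by_cases h10 : M.take 10 = pvPat2Tail
    · obtain ⟨M', rfl⟩ := pvTake10_shape M h10
      have h7' : ¬((2::0::0::0::2::0::2::2::2::2::M').take 7 = pvPat1Tail) := by simp [pvPat1Tail]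
      simp [pyRle, pvHeadHit, pvHits, h10]
      split_ifs <;> first | omega | simp_all [pvPat1Tail]
    · rcases hsh : pyRle M with _|⟨b, _|⟨c, _|⟨d, _|⟨e, _|⟨f, rs⟩⟩⟩⟩⟩ <;>
        simp [pvHeadHit, pvHits, h7, h10]
      have hc1 : ¬(x = 2 ∧ 4 ≤ j ∧ (b = (0, 1) ∧ c = (2, 1) ∧ d = (0, 3) ∧ e = (2, 1)) ∧ f.1 = 0) := by
        rintro ⟨rfl, -, ⟨rfl, rfl, rfl, rfl⟩, hf⟩
        rcases f with ⟨fv, fl⟩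
        simp at hf
        subst hf
        obtain ⟨M1, rfl, -, h1, -⟩ := pvRle_inv hsh
        obtain ⟨M2, rfl, -, h2, -⟩ := pvRle_inv h1
        obtain ⟨M3, rfl, -, h3, -⟩ := pvRle_inv h2
        obtain ⟨M4, rfl, -, h4, -⟩ := pvRle_inv h3
        obtain ⟨M5, rfl, hfl, -, -⟩ := pvRle_inv h4
        have hfl' : fl.toNat = (fl.toNat - 1) + 1 := by omega
        apply h7
        rw [hfl', List.replicate_succ]
        simp [pvPat1Tail]
      have hc2 : ¬(x = 0 ∧ (b = (2, 1) ∧ c = (0, 3) ∧ d = (2, 1) ∧ e = (0, 1)) ∧ f.1 = 2 ∧ 4 ≤ f.2) := by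
        rintro ⟨rfl, ⟨rfl, rfl, rfl, rfl⟩, hf, hfl4⟩
        rcases f with ⟨fv, fl⟩
        simp at hf hfl4
        subst hf
        obtain ⟨M1, rfl, -, h1, -⟩ := pvRle_inv hsh
        obtain ⟨M2, rfl, -, h2, -⟩ := pvRle_inv h1
        obtain ⟨M3, rfl, -, h3, -⟩ := pvRle_inv h2
        obtain ⟨M4, rfl, -, h4, -⟩ := pvRle_inv h3
        obtain ⟨M5, rfl, -, -, -⟩ := pvRle_inv h4
        have hfl' : fl.toNat = (fl.toNat - 4) + 4 := by omega
        apply h10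
        rw [hfl']
        simp [pvPat2Tail, List.replicate_succ]
      simp [hc1, hc2]

lemma pvCountRuns_cons (a : Int × Int) (rs : List (Int × Int)) :
    pyCountRuns (a :: rs) = pvHeadHit a rs + pyCountRuns rs := by
  match rs with
  | [] => simp [pyCountRuns, pvHeadHit]
  | [b] => simp [pyCountRuns, pvHeadHit]
  | [b, c] => simp [pyCountRuns, pvHeadHit]
  | [b, c, d] => simp [pyCountRuns, pvHeadHit]
  | [b, c, d, e] => simp [pyCountRuns, pvHeadHit]
  | b :: c :: d :: e :: f :: rest => rw [pyCountRuns, pvHeadHit]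

lemma pvLineB (L : List Int) : pyCountRuns (pyRle L) = 40 * pvTCount L := by
  induction L using pyRle.induct with
  | case1 => simp [pyRle, pyCountRuns, pvTCount]
  | case2 x xs ih =>
    rw [pyRle, pvCountRuns_cons, ih]
    have hdec : x :: xs =
        List.replicate ((xs.takeWhile (fun y => y == x)).length + 1) x ++ xs.dropWhile (fun y => y == x) := by
      rw [List.replicate_succ, List.cons_append, ← pvTW_replicate, List.takeWhile_append_dropWhile]
    rw [pvHeadHit_eq x _ ((xs.takeWhile (fun y => y == x)).length + 1) _ (by push_cast; ring) (by omega)]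
    conv_rhs => rw [hdec]
    rw [pvTCount_run x _ (pvDW_head x xs)]
    ring

-- ===== VERDICT (by name: the statement is the Claim_ definition above) =====
theorem evaluate_3_py_spec : Claim_equal_evaluate_3_py := by
  intro matrix _
  show evaluate_3_py matrix = evaluate_3_py_alt matrix
  simp only [evaluate_3_py, evaluate_3_py_alt, List.foldl_append]
  have hfold : ∀ (ls : List (List Int)) (a : Int),
      ls.foldl (fun pts row =>
        (PySem.List.pyRange 0 row.length 1).foldl (fun p c =>
          if PySem.List.slice row (some c) (some (c + 11)) = pvP1 ∨
             PySem.List.slice row (some c) (some (c + 11)) = pvP2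
          then p + 40 else p) pts) a =
      ls.foldl (fun tot line => tot + pyCountRuns (pyRle line)) a := by
    intro ls
    induction ls with
    | nil => intro a; rfl
    | cons r rs ihs =>
      intro a
      rw [List.foldl_cons, List.foldl_cons, pvLineB]
      have hA := pvLineA_aux r r.length 0 a (by omega)
      simp only [Nat.cast_zero, List.drop_zero] at hA
      rw [hA, ihs]
  rw [hfold, hfold]
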